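-- pv_equiv track=rewrite | github.com/cyrilmourin/veille-parlementaire-sport | src/ping_state.py | snapshot_from_rows
-- ===== SOURCE A (Python) =====
-- from typing import Iterable
--
-- PING_CATEGORIES: tuple[str, ...] = (
--     "dossiers_legislatifs",
--     "amendements",
--     "questions",
--     "comptes_rendus",
-- )
--
-- def snapshot_from_rows(
--     rows: Iterable[dict],
--     categories: Iterable[str] = PING_CATEGORIES,
-- ) -> dict[str, list[str]]:
--     """Extrait `{cat: [hash_key, …]}` depuis une itérable de rows DB.
--
--     Règles :
--     - Ne retient que les rows dont `category ∈ categories`.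
--     - Ne retient que les rows matchés (matched_keywords JSON != "[]").
--     - Le hash_key sert d'identifiant stable cross-runs
--       (`f"{source_id}::{uid}"`, cf. `models.Item.hash_key`).
--       La DB ne le stocke pas en colonne dédiée (c'est la PK) → on le
--       recompose depuis `source_id` + `uid`, robuste au renommage des
--       colonnes SQLite.
--
--     La sortie est déterministe (listes triées) pour diff git stable.
--     """
--     cat_set = set(categories)
--     buckets: dict[str, set[str]] = {c: set() for c in cat_set}
--     for r in rows:
--         cat = r.get("category")
--         if cat not in cat_set:
--             continue
--         matched = r.get("matched_keywords") or "[]"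
--         # matched_keywords est stocké en JSON string par Store.upsert_many.
--         # On tolère aussi les lists (tests en mémoire) et les bytes.
--         if isinstance(matched, (bytes, bytearray)):
--             matched = matched.decode("utf-8", errors="ignore")
--         if isinstance(matched, str):
--             s = matched.strip()
--             if not s or s == "[]":
--                 continue
--         elif isinstance(matched, (list, tuple)):
--             if not matched:
--                 continue
--         else:
--             continue
--         source_id = r.get("source_id") or ""
--         uid = r.get("uid") or ""
--         if not source_id or not uid:
--             continue
--         hk = r.get("hash_key") or f"{source_id}::{uid}"
--         buckets[cat].add(hk)
--     return {c: sorted(v) for c, v in buckets.items()}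
-- ===== SOURCE B (Python) =====
-- from typing import Iterable
--
-- PING_CATEGORIES: tuple[str, ...] = (
--     "dossiers_legislatifs",
--     "amendements",
--     "questions",
--     "comptes_rendus",
-- )
--
--
-- def _accept_hash_key(r: dict):
--     """Return the row's hash_key if the row is matched and complete, else None."""
--     matched = r.get("matched_keywords") or "[]"
--     if isinstance(matched, (bytes, bytearray)):
--         matched = matched.decode("utf-8", errors="ignore")
--     if isinstance(matched, str):
--         s = matched.strip()
--         if not s or s == "[]":
--             return None
--     elif isinstance(matched, (list, tuple)):
--         if not matched:
--             return None
--     else: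
--         return None
--     source_id = r.get("source_id") or ""
--     uid = r.get("uid") or ""
--     if not source_id or not uid:
--         return None
--     return r.get("hash_key") or f"{source_id}::{uid}"
--
--
-- def snapshot_from_rows(
--     rows: Iterable[dict],
--     categories: Iterable[str] = PING_CATEGORIES,
-- ) -> dict[str, list[str]]:
--     cat_set = set(categories)
--     accepted: list[tuple[str, str]] = []
--     for r in rows:  # rows may be a one-shot generator: scan it exactly once
--         cat = r.get("category")
--         if cat in cat_set:
--             hk = _accept_hash_key(r)
--             if hk is not None:
--                 accepted.append((cat, hk))
--     return {c: sorted({h for cc, h in accepted if cc == c}) for c in cat_set}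
-- ===== Notes on version B (the rewrite author's own statement) =====
-- stated objective: alternative
-- what changed: Replaces single-pass insertion into per-category set buckets by a filter-then-group decomposition: one pass collects accepted (category, hash_key) pairs via a small predicate helper, then a comprehension groups, dedups and sorts per category.
import Mathlib
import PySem

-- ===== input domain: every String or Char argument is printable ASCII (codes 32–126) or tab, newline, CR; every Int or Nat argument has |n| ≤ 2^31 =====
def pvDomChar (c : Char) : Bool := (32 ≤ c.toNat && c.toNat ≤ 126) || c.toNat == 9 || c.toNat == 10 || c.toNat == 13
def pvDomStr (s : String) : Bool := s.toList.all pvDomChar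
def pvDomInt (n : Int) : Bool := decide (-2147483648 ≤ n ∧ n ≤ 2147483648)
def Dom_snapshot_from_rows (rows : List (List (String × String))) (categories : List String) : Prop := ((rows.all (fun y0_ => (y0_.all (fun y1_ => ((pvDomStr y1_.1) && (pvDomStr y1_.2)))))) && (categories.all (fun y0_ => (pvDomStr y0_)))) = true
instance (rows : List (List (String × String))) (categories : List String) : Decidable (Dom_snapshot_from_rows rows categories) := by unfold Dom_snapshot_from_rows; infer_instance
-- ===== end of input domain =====

-- B replaces A's single-pass insertion into per-category set buckets by a
-- filter-then-group decomposition (collect accepted (category, hash_key) pairs,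
-- then group/dedup/sort per category); same return value, similar cost.
-- Python iterates `cat_set` (a hash set) to build the bucket/output dicts; that
-- iteration order is not modelled (dict outputs are compared ignoring order):
-- both ports use first-occurrence order (PySem.Set.ofList).

-- ===== PORT A =====
-- r.get(k) on a row dict: first matching key of the association list
def pvRowGet (r : List (String × String)) (k : String) : Option String :=
  (PySem.Dict.mk r).get? k

-- body of A's `for r in rows` loop (named so the proofs can speak about it);
-- row values are strings on this domain, so the bytes/list/tuple branches of A
-- never fire and `x or y` means `if x = "" then y else x`.
def pvAStep (catSet : PySem.Set String)
    (d : PySem.Dict String (PySem.Set String))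
    (r : List (String × String)) : PySem.Dict String (PySem.Set String) :=
  match pvRowGet r "category" with
  | none => d          -- cat is None: `cat not in cat_set` → continue
  | some cat =>
    if catSet.contains cat then
      let matched := match pvRowGet r "matched_keywords" with
        | none => "[]"
        | some m => if m = "" then "[]" else m
      let s := PySem.Str.strip matched
      if s = "" ∨ s = "[]" then d
      else
        let sourceId := match pvRowGet r "source_id" with
          | none => ""
          | some v => v
        let uid := match pvRowGet r "uid" with
          | none => ""
          | some v => v
        if sourceId = "" ∨ uid = "" then d
        else
          let hk := match pvRowGet r "hash_key" with
            | none => sourceId ++ "::" ++ uid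
            | some h => if h = "" then sourceId ++ "::" ++ uid else h
          d.modify cat PySem.Set.empty (fun v => PySem.Set.add v hk)
    else d

def snapshot_from_rows (rows : List (List (String × String))) (categories : List String) : List (String × List String) :=
  let catSet : PySem.Set String := PySem.Set.ofList categories
  let buckets0 : PySem.Dict String (PySem.Set String) :=
    catSet.foldl (fun d c => d.insert c PySem.Set.empty) PySem.Dict.empty
  let buckets := rows.foldl (pvAStep catSet) buckets0
  buckets.items.map (fun p => (p.1, PySem.List.sorted p.2 (fun x => x) false))

-- ===== PORT B =====
-- B's helper `_accept_hash_key`: the row's hash key if matched and complete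
def pvAcceptHashKey (r : List (String × String)) : Option String :=
  let matched := match pvRowGet r "matched_keywords" with
    | none => "[]"
    | some m => if m = "" then "[]" else m
  let s := PySem.Str.strip matched
  if s = "" ∨ s = "[]" then none
  else
    let sourceId := match pvRowGet r "source_id" with
      | none => ""
      | some v => v
    let uid := match pvRowGet r "uid" with
      | none => ""
      | some v => v
    if sourceId = "" ∨ uid = "" then none
    else
      some (match pvRowGet r "hash_key" with
        | none => sourceId ++ "::" ++ uid
        | some h => if h = "" then sourceId ++ "::" ++ uid else h)

-- body of B's `for r in rows` loop
def pvBStep (catSet : PySem.Set String)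
    (acc : List (String × String)) (r : List (String × String)) : List (String × String) :=
  match pvRowGet r "category" with
  | none => acc        -- cat is None: `cat in cat_set` is False
  | some cat =>
    if catSet.contains cat then
      match pvAcceptHashKey r with
      | none => acc
      | some hk => acc ++ [(cat, hk)]
    else acc

def snapshot_from_rows_alt (rows : List (List (String × String))) (categories : List String) : List (String × List String) :=
  let catSet : PySem.Set String := PySem.Set.ofList categories
  let accepted := rows.foldl (pvBStep catSet) []
  catSet.map (fun c =>
    (c, PySem.List.sorted
          (PySem.Set.ofList ((accepted.filter (fun p => p.1 == c)).map (fun p => p.2)))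
          (fun x => x) false))

-- ===== PRECONDITION & SPEC =====
def Spec_snapshot_from_rows (rows : List (List (String × String))) (categories : List String) (out : List (String × List String)) : Prop := out = snapshot_from_rows_alt rows categories
instance (rows : List (List (String × String))) (categories : List String) (out : List (String × List String)) : Decidable (Spec_snapshot_from_rows rows categories out) := by unfold Spec_snapshot_from_rows; infer_instance

-- ===== CLAIM (what is proved, stated in full; the proofs are below) =====
def Claim_equal_snapshot_from_rows : Prop := ∀ (rows : List (List (String × String))) (categories : List String), Dom_snapshot_from_rows rows categories → Spec_snapshot_from_rows rows categories (snapshot_from_rows rows categories)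

-- ===== LEMMAS AND PROOFS =====

-- the per-category set B computes from the collected pairs
def pvG (acc : List (String × String)) (c : String) : PySem.Set String :=
  PySem.Set.ofList ((acc.filter (fun p => p.1 == c)).map (fun p => p.2))

lemma pvG_append (acc : List (String × String)) (cat hk c : String) :
    pvG (acc ++ [(cat, hk)]) c
      = if cat = c then PySem.Set.add (pvG acc c) hk else pvG acc c := by
  by_cases h : cat = c <;>
    simp [pvG, List.filter_append, PySem.Set.ofList, List.foldl_append, h]

lemma pv_init_aux (s : List String) (m : List (String × PySem.Set String))
    (hm : ∀ c ∈ s, ∀ p ∈ m, p.1 ≠ c) (hnd : s.Nodup) :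
    s.foldl (fun d c => d.insert c PySem.Set.empty) (PySem.Dict.mk m)
      = PySem.Dict.mk (m ++ s.map (fun c => (c, PySem.Set.empty))) := by
  induction s generalizing m with
  | nil => simp
  | cons c t ih =>
    have hcon : (PySem.Dict.mk m).contains c = false := by
      simp only [PySem.Dict.contains, List.any_eq_false]
      intro p hp
      simpa using hm c (by simp) p hp
    have hins : (PySem.Dict.mk m).insert c PySem.Set.empty
        = PySem.Dict.mk (m ++ [(c, PySem.Set.empty)]) := by
      simp [PySem.Dict.insert, hcon]
    simp only [List.foldl_cons, hins]
    rw [ih (m ++ [(c, PySem.Set.empty)])]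
    · simp
    · intro c' hc' p hp
      rcases List.mem_append.mp hp with h | h
      · exact hm c' (by simp [hc']) p h
      · simp only [List.mem_singleton] at h
        subst h
        simp only [List.nodup_cons] at hnd
        intro he
        simp only at he
        exact hnd.1 (he ▸ hc')
    · exact (List.nodup_cons.mp hnd).2

lemma pv_getD (s : List String) (g : String → PySem.Set String) (c : String) (hc : c ∈ s) :
    (PySem.Dict.mk (s.map (fun c' => (c', g c')))).getD c PySem.Set.empty = g c := by
  induction s with
  | nil => cases hc
  | cons c₀ t ih =>
    by_cases h : c₀ = c
    · subst h
      simp [PySem.Dict.getD, PySem.Dict.get?]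
    · have hc' : c ∈ t := by
        rcases List.mem_cons.mp hc with h' | h'
        · exact absurd h'.symm h
        · exact h'
      simpa [PySem.Dict.getD, PySem.Dict.get?, h] using ih hc'

lemma pv_contains (s : List String) (g : String → PySem.Set String) (c : String) (hc : c ∈ s) :
    (PySem.Dict.mk (s.map (fun c' => (c', g c')))).contains c = true := by
  simp only [PySem.Dict.contains, List.any_map, List.any_eq_true]
  exact ⟨c, hc, by simp⟩

lemma pv_modify (s : List String) (g : String → PySem.Set String) (cat hk : String)
    (hc : cat ∈ s) :
    (PySem.Dict.mk (s.map (fun c' => (c', g c')))).modify cat PySem.Set.empty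
        (fun v => PySem.Set.add v hk)
      = PySem.Dict.mk (s.map (fun c' =>
          (c', if cat = c' then PySem.Set.add (g c') hk else g c'))) := by
  simp only [PySem.Dict.modify, PySem.Dict.insert, pv_contains s g cat hc,
    pv_getD s g cat hc, if_true, List.map_map]
  congr 1
  apply List.map_congr_left
  intro c' _
  simp only [Function.comp_apply]
  by_cases h : c' = cat
  · subst h
    simp
  · simp [h, Ne.symm h]

lemma pv_step (catSet : PySem.Set String) (acc : List (String × String))
    (r : List (String × String)) :
    pvAStep catSet (PySem.Dict.mk (catSet.map (fun c => (c, pvG acc c)))) r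
      = PySem.Dict.mk (catSet.map (fun c => (c, pvG (pvBStep catSet acc r) c))) := by
  unfold pvAStep pvBStep pvAcceptHashKey
  cases hcat : pvRowGet r "category" with
  | none => rfl
  | some cat =>
    by_cases hm : cat ∈ catSet
    · have hcs : catSet.contains cat = true := by simpa [PySem.Set.contains] using hm
      simp only [hcs, if_true]
      split_ifs with h1 h2
      · rfl
      · rfl
      · rw [pv_modify catSet (fun c => pvG acc c) cat _ hm]
        congr 1
        apply List.map_congr_left
        intro c' _
        simp [pvG_append]
    · have hcs : ¬ catSet.contains cat = true := by simpa [PySem.Set.contains] using hm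
      simp [hm]


lemma pv_loop (catSet : PySem.Set String) (rows : List (List (String × String)))
    (acc : List (String × String)) :
    rows.foldl (pvAStep catSet) (PySem.Dict.mk (catSet.map (fun c => (c, pvG acc c))))
      = PySem.Dict.mk (catSet.map (fun c =>
          (c, pvG (rows.foldl (pvBStep catSet) acc) c))) := by
  induction rows generalizing acc with
  | nil => rfl
  | cons r t ih =>
    simp only [List.foldl_cons, pv_step]
    exact ih (pvBStep catSet acc r)

-- ===== VERDICT (by name: the statement is the Claim_ definition above) =====
theorem snapshot_from_rows_spec : Claim_equal_snapshot_from_rows := by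
  intro rows categories _
  unfold Spec_snapshot_from_rows snapshot_from_rows snapshot_from_rows_alt
  have hinit :
      (PySem.Set.ofList categories).foldl
          (fun d c => d.insert c PySem.Set.empty) PySem.Dict.empty
        = PySem.Dict.mk ((PySem.Set.ofList categories).map (fun c => (c, pvG [] c))) := by
    have := pv_init_aux (PySem.Set.ofList categories) []
      (by intro c _ p hp; cases hp) (PySem.Set.nodup_ofList categories)
    simpa [PySem.Dict.empty, pvG, PySem.Set.ofList] using this
  simp only [hinit, pv_loop]
  simp [pvG, List.map_map, Function.comp]
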